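-- pv_equiv track=rewrite | github.com/hxyyyyyyyyyyyyyyyyyyyyyy/Alpha-SQL | alphasql/runner/path_template_accuracy.py | _count_difficulty_totals
-- ===== SOURCE A (Python) =====
-- from typing import Dict, List, Tuple
--
-- def _count_difficulty_totals(difficulty_by_qid: Dict[int, str]) -> Dict[str, int]:
--     totals = {"simple": 0, "moderate": 0, "challenging": 0, "unknown": 0}
--     for difficulty in difficulty_by_qid.values():
--         if difficulty in totals:
--             totals[difficulty] += 1
--         else:
--             totals["unknown"] += 1
--     return totals
-- ===== SOURCE B (Python) =====
-- def _count_difficulty_totals(difficulty_by_qid):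
--     vals = list(difficulty_by_qid.values())
--     simple = vals.count("simple")
--     moderate = vals.count("moderate")
--     challenging = vals.count("challenging")
--     return {
--         "simple": simple,
--         "moderate": moderate,
--         "challenging": challenging,
--         "unknown": len(vals) - simple - moderate - challenging,
--     }
-- ===== Notes on version B (the rewrite author's own statement) =====
-- stated objective: alternative
-- what changed: Replaces the single branching accumulation loop over a mutable totals dict by three independent list.count scans for the known categories, with 'unknown' computed arithmetically as len(values) minus the three known counts, assembling the fixed-key result dict directly.
import Mathlib
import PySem

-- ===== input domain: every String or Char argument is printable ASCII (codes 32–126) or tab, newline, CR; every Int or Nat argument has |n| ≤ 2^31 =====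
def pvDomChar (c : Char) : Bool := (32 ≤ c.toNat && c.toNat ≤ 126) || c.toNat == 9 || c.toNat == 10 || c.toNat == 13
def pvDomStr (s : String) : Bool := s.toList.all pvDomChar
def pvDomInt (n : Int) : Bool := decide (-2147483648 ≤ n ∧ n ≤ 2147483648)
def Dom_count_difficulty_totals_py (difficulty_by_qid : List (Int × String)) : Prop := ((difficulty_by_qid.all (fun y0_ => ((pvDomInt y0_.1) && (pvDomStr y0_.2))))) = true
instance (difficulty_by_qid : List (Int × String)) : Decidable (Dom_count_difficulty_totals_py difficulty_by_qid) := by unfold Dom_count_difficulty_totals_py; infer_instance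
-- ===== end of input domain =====

-- B differs from A by counting each known category with an independent scan and deriving
-- 'unknown' arithmetically, instead of one branching pass updating a mutable totals dict.

-- ===== PORT A =====
-- totals = {"simple": 0, "moderate": 0, "challenging": 0, "unknown": 0};
-- for difficulty in values: if in totals: totals[difficulty] += 1 else: totals["unknown"] += 1
def count_difficulty_totals_py (difficulty_by_qid : List (Int × String)) : List (String × Int) :=
  let totals0 : PySem.Dict String Int :=
    PySem.Dict.ofList [("simple", 0), ("moderate", 0), ("challenging", 0), ("unknown", 0)]
  let totals := (PySem.Dict.ofList difficulty_by_qid).values.foldl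
    (fun t d => if t.contains d then t.modify d 0 (· + 1) else t.modify "unknown" 0 (· + 1))
    totals0
  totals.items

-- ===== PORT B =====
def count_difficulty_totals_py_alt (difficulty_by_qid : List (Int × String)) : List (String × Int) :=
  let vals := (PySem.Dict.ofList difficulty_by_qid).values
  let simple := PySem.List.count vals "simple"
  let moderate := PySem.List.count vals "moderate"
  let challenging := PySem.List.count vals "challenging"
  [("simple", simple), ("moderate", moderate), ("challenging", challenging),
   ("unknown", (vals.length : Int) - simple - moderate - challenging)]

-- ===== PRECONDITION & SPEC =====
def Spec_count_difficulty_totals_py (difficulty_by_qid : List (Int × String)) (out : List (String × Int)) : Prop := out = count_difficulty_totals_py_alt difficulty_by_qid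
instance (difficulty_by_qid : List (Int × String)) (out : List (String × Int)) : Decidable (Spec_count_difficulty_totals_py difficulty_by_qid out) := by unfold Spec_count_difficulty_totals_py; infer_instance

-- ===== CLAIM (what is proved, stated in full; the proofs are below) =====
def Claim_equal_count_difficulty_totals_py : Prop := ∀ (difficulty_by_qid : List (Int × String)), Dom_count_difficulty_totals_py difficulty_by_qid → Spec_count_difficulty_totals_py difficulty_by_qid (count_difficulty_totals_py difficulty_by_qid)

-- ===== LEMMAS AND PROOFS =====

def pvStep (t : PySem.Dict String Int) (d : String) : PySem.Dict String Int :=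
  if t.contains d then t.modify d 0 (· + 1) else t.modify "unknown" 0 (· + 1)

def pvK4 : List String := ["simple", "moderate", "challenging", "unknown"]

lemma pvStep_keys (t : PySem.Dict String Int) (h : t.keys = pvK4) (d : String) :
    (pvStep t d).keys = pvK4 := by
  unfold pvStep
  split_ifs with hc
  · rw [PySem.Dict.keys_modify, PySem.Dict.keys_insert_of_contains _ _ hc, h]
  · have hu : t.contains "unknown" = true := by
      rw [PySem.Dict.contains_eq_decide_mem_keys, h]; decide
    rw [PySem.Dict.keys_modify, PySem.Dict.keys_insert_of_contains _ _ hu, h]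

lemma pvFoldl_keys (vals : List String) :
    ∀ t : PySem.Dict String Int, t.keys = pvK4 → (vals.foldl pvStep t).keys = pvK4 := by
  induction vals with
  | nil => intro t h; simpa using h
  | cons d rest ih => intro t h; simpa using ih (pvStep t d) (pvStep_keys t h d)

lemma pvContains_of_keys (t : PySem.Dict String Int) (h : t.keys = pvK4) (k : String) :
    t.contains k = decide (k ∈ pvK4) := by
  rw [PySem.Dict.contains_eq_decide_mem_keys, h]

-- getD of the fold at a known non-"unknown" key
lemma pvFoldl_getD_known (k : String) (hk : k ∈ pvK4) (hne : k ≠ "unknown")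
    (vals : List String) :
    ∀ t : PySem.Dict String Int, t.keys = pvK4 →
      (vals.foldl pvStep t).getD k 0 = t.getD k 0 + (vals.count k : Int) := by
  induction vals with
  | nil => intro t _; simp
  | cons d rest ih =>
    intro t h
    have hkeys := pvStep_keys t h d
    have hrec := ih (pvStep t d) hkeys
    simp only [List.foldl_cons] at *
    rw [hrec]
    unfold pvStep
    rw [pvContains_of_keys t h d]
    by_cases hd : d ∈ pvK4
    · simp only [hd, decide_true, if_true]
      rw [PySem.Dict.getD_modify]
      by_cases hdk : k = d
      · subst hdk; simp; ring
      · rw [if_neg hdk]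
        have : d ≠ k := fun h' => hdk h'.symm
        simp [this]
    · simp only [hd, decide_false, Bool.false_eq_true, if_false]
      rw [PySem.Dict.getD_modify, if_neg hne]
      have hdk : d ≠ k := fun h' => hd (h' ▸ hk)
      simp [hdk]

lemma pvFoldl_getD_unknown (vals : List String) :
    ∀ t : PySem.Dict String Int, t.keys = pvK4 →
      (vals.foldl pvStep t).getD "unknown" 0 =
        t.getD "unknown" 0 + (vals.length : Int) - (vals.count "simple" : Int)
          - (vals.count "moderate" : Int) - (vals.count "challenging" : Int) := by
  induction vals with
  | nil => intro t _; simp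
  | cons d rest ih =>
    intro t h
    have hkeys := pvStep_keys t h d
    have hrec := ih (pvStep t d) hkeys
    simp only [List.foldl_cons] at *
    rw [hrec]
    unfold pvStep
    rw [pvContains_of_keys t h d]
    by_cases hd : d ∈ pvK4
    · simp only [hd, decide_true, if_true]
      rw [PySem.Dict.getD_modify]
      by_cases hdu : d = "unknown"
      · subst hdu
        have h1 : ("unknown" : String) ≠ "simple" := by decide
        have h2 : ("unknown" : String) ≠ "moderate" := by decide
        have h3 : ("unknown" : String) ≠ "challenging" := by decide
        simp [h1, h2, h3]
        ring
      · rw [if_neg (fun h' => hdu h'.symm)]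
        have : d = "simple" ∨ d = "moderate" ∨ d = "challenging" := by
          simp [pvK4] at hd; tauto
        rcases this with rfl | rfl | rfl <;>
          · simp; ring
    · simp only [hd, decide_false, Bool.false_eq_true, if_false]
      rw [PySem.Dict.getD_modify, if_pos rfl]
      have h1 : d ≠ "simple" := fun h' => hd (by simp [pvK4, h'])
      have h2 : d ≠ "moderate" := fun h' => hd (by simp [pvK4, h'])
      have h3 : d ≠ "challenging" := fun h' => hd (by simp [pvK4, h'])
      simp [h1, h2, h3]
      ring

-- ===== VERDICT (by name: the statement is the Claim_ definition above) =====
theorem count_difficulty_totals_py_spec : Claim_equal_count_difficulty_totals_py := by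
  intro l _
  unfold Spec_count_difficulty_totals_py count_difficulty_totals_py count_difficulty_totals_py_alt
  simp only []
  set vals := (PySem.Dict.ofList l).values with hv
  set totals0 : PySem.Dict String Int :=
    PySem.Dict.ofList [("simple", 0), ("moderate", 0), ("challenging", 0), ("unknown", 0)] with ht0
  have h0 : totals0.keys = pvK4 := by decide
  have hfold : (vals.foldl pvStep totals0).keys = pvK4 := pvFoldl_keys vals totals0 h0
  have hstep : (fun (t : PySem.Dict String Int) d =>
      if t.contains d then t.modify d 0 (· + 1) else t.modify "unknown" 0 (· + 1)) = pvStep := rfl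
  rw [hstep]
  have hnd : (vals.foldl pvStep totals0).keys.Nodup := by rw [hfold]; decide
  rw [PySem.Dict.items_eq_map_keys _ hnd 0, hfold]
  have hs := pvFoldl_getD_known "simple" (by decide) (by decide) vals totals0 h0
  have hm := pvFoldl_getD_known "moderate" (by decide) (by decide) vals totals0 h0
  have hc := pvFoldl_getD_known "challenging" (by decide) (by decide) vals totals0 h0
  have hu := pvFoldl_getD_unknown vals totals0 h0
  have g0s : totals0.getD "simple" 0 = 0 := by decide
  have g0m : totals0.getD "moderate" 0 = 0 := by decide
  have g0c : totals0.getD "challenging" 0 = 0 := by decide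
  have g0u : totals0.getD "unknown" 0 = 0 := by decide
  simp only [pvK4, List.map_cons, List.map_nil, hs, hm, hc, hu, g0s, g0m, g0c, g0u,
    PySem.List.count_eq, zero_add]
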